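-- pv_equiv track=rewrite | github.com/JasperGitCode/Qlock | qlock/utils.py | get_leds_xy
-- ===== SOURCE A (Python) =====
-- def get_leds_xy(x, y, length = 1, direction = "y"):
--     leds = []
--
--     led = 0
--     if y % 2 == 0:
--         led = y * 11 + x
--     else:
--         led = (y + 1) * 11 - x - 1
--
--     if led <= 109:
--         leds.append(led)
--     else:
--         return leds
--
--     if direction == "y":
--         for i in range(length - 1):
--             led = 0
--             if (y + i) % 2 == 0:
--                 led = leds[i] + 21 - 2 * x
--             else:
--                 led = leds[i] + 21 - 2 * (10 - x)
--
--             if led <= 109: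
--                 leds.append(led)
--             else:
--                 break
--
--     leds = list(filter(lambda x: x >= 0, leds))
--     return leds
-- ===== SOURCE B (Python) =====
-- def get_leds_xy(x, y, length = 1, direction = "y"):
--     def led_at(r):
--         return r * 11 + x if r % 2 == 0 else (r + 1) * 11 - x - 1
--     count = max(1, length) if direction == "y" else 1
--     leds = []
--     for j in range(count):
--         led = led_at(y + j)
--         if led <= 109:
--             leds.append(led)
--         else:
--             break
--     return [l for l in leds if l >= 0]
-- ===== Notes on version B (the rewrite author's own statement) =====
-- stated objective: simpler
-- what changed: B replaces A's previous-element recurrence (leds[i] + parity-dependent offset, with a special-cased first row) by one uniform per-row closed form led_at(r) evaluated independently for each row, collapsing A's head computation and loop into a single loop over range(count).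
import Mathlib
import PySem

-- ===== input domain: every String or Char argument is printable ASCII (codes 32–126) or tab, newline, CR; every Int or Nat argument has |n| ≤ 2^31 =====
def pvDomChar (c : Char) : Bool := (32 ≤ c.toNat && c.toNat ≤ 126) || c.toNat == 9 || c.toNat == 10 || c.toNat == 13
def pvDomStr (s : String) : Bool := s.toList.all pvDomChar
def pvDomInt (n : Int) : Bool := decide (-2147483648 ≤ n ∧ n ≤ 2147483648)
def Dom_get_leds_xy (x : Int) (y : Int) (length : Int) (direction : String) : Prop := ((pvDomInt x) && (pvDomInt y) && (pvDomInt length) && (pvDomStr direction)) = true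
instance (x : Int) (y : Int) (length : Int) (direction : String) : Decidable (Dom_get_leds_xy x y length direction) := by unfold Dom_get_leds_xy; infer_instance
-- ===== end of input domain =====

-- B replaces A's previous-element recurrence by a per-row closed form; objective: simpler.

-- ===== PORT A =====
-- A's for-loop 'for i in range(length - 1)': n counts the remaining iterations
-- (range is lazy in Python, so the loop is a counter, not a materialized list),
-- i is the loop variable; leds[i] is read with pyGetD (always in range: leds
-- grows by one per iteration); append while led <= 109, break otherwise.
def pvALoop (x y : Int) : Nat → Int → List Int → List Int
  | 0, _, leds => leds
  | n + 1, i, leds =>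
    let led := if PySem.Int.mod (y + i) 2 == 0
               then PySem.List.pyGetD leds i 0 + 21 - 2 * x
               else PySem.List.pyGetD leds i 0 + 21 - 2 * (10 - x)
    if led ≤ 109 then pvALoop x y n (i + 1) (leds ++ [led]) else leds

def get_leds_xy (x : Int) (y : Int) (length : Int) (direction : String) : List Int :=
  let led : Int := if PySem.Int.mod y 2 == 0 then y * 11 + x else (y + 1) * 11 - x - 1
  if led ≤ 109 then
    let leds := [led]
    let leds := if direction == "y" then pvALoop x y (length - 1).toNat 0 leds else leds
    leds.filter (fun l => decide (0 ≤ l))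
  else []

-- ===== PORT B =====
def pvLedAt (x r : Int) : Int :=
  if PySem.Int.mod r 2 == 0 then r * 11 + x else (r + 1) * 11 - x - 1

-- B's 'for j in range(count)' with break, as fuel n + loop variable j
def pvBLoop (x y : Int) : Nat → Int → List Int → List Int
  | 0, _, leds => leds
  | n + 1, j, leds =>
    let led := pvLedAt x (y + j)
    if led ≤ 109 then pvBLoop x y n (j + 1) (leds ++ [led]) else leds

def get_leds_xy_alt (x : Int) (y : Int) (length : Int) (direction : String) : List Int :=
  let count : Int := if direction == "y" then max 1 length else 1
  (pvBLoop x y count.toNat 0 []).filter (fun l => decide (0 ≤ l))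

-- ===== PRECONDITION & SPEC =====
def Spec_get_leds_xy (x : Int) (y : Int) (length : Int) (direction : String) (out : List Int) : Prop := out = get_leds_xy_alt x y length direction
instance (x : Int) (y : Int) (length : Int) (direction : String) (out : List Int) : Decidable (Spec_get_leds_xy x y length direction out) := by unfold Spec_get_leds_xy; infer_instance

-- ===== CLAIM (what is proved, stated in full; the proofs are below) =====
def Claim_equal_get_leds_xy : Prop := ∀ (x : Int) (y : Int) (length : Int) (direction : String), Dom_get_leds_xy x y length direction → Spec_get_leds_xy x y length direction (get_leds_xy x y length direction)

-- ===== LEMMAS AND PROOFS =====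

-- the recurrence A uses to go from row r to row r+1 equals the closed form at r+1
theorem pvLedAt_step (x y : Int) (k : Int) :
    (if PySem.Int.mod (y + k) 2 == 0
     then pvLedAt x (y + k) + 21 - 2 * x
     else pvLedAt x (y + k) + 21 - 2 * (10 - x)) = pvLedAt x (y + k + 1) := by
  simp only [pvLedAt, PySem.Int.mod_eq_emod_of_pos (by norm_num : (0:Int) < 2), beq_iff_eq]
  split_ifs <;> omega

theorem pvLoopEq (x y : Int) : ∀ (n : Nat) (k : Nat) (acc : List Int),
    acc.length = k + 1 → acc.getD k 0 = pvLedAt x (y + k) →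
    pvALoop x y n (k : Int) acc = pvBLoop x y n ((k : Int) + 1) acc := by
  intro n
  induction n with
  | zero => intro k acc _ _; rfl
  | succ n ih =>
    intro k acc hlen hget
    have hy : y + ((k : Int) + 1) = y + (k : Int) + 1 := by ring
    simp only [pvALoop, pvBLoop, PySem.List.pyGetD_natCast, hget, pvLedAt_step, hy]
    split_ifs with h
    · have h2 : ((k : Int) + 1) = ((k + 1 : Nat) : Int) := by push_cast; ring
      rw [h2]
      refine ih (k + 1) (acc ++ [pvLedAt x (y + (k : Int) + 1)]) (by simp [hlen]) ?_
      have hg : (acc ++ [pvLedAt x (y + (k : Int) + 1)]).getD (k + 1) 0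
           = pvLedAt x (y + (k : Int) + 1) := by
        simp [List.getD, hlen]
      rw [hg]; push_cast; ring_nf
    · rfl

-- ===== VERDICT (by name: the statement is the Claim_ definition above) =====
theorem get_leds_xy_spec : Claim_equal_get_leds_xy := by
  intro x y length direction _
  unfold Spec_get_leds_xy get_leds_xy get_leds_xy_alt
  by_cases hd : direction == "y"
  · simp only [hd, if_pos]
    set led0 := if PySem.Int.mod y 2 == 0 then y * 11 + x else (y + 1) * 11 - x - 1 with hled0
    have hB0 : pvLedAt x (y + 0) = led0 := by simp [pvLedAt, hled0]
    obtain ⟨n, hn, hn'⟩ : ∃ n : Nat, (max 1 length).toNat = n + 1 ∧ n = (length - 1).toNat := by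
      exact ⟨(length - 1).toNat, by omega, rfl⟩
    rw [hn]
    by_cases h0 : led0 ≤ 109
    · simp only [pvBLoop, hB0, h0, if_pos, List.nil_append]
      rw [hn']
      have hl := pvLoopEq x y ((length - 1).toNat) 0 [led0] (by simp) (by simpa using hB0)
      simp only [Nat.cast_zero] at hl
      rw [hl]
    · simp only [pvBLoop, hB0, h0, if_neg, not_false_iff, List.filter_nil]
  · simp only [hd, if_neg, Bool.false_eq_true, not_false_iff]
    set led0 := if PySem.Int.mod y 2 == 0 then y * 11 + x else (y + 1) * 11 - x - 1 with hled0
    have hB0 : pvLedAt x y = led0 := by simpa using (by simp [pvLedAt, hled0] : pvLedAt x (y + 0) = led0)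
    by_cases h0 : led0 ≤ 109 <;> simp [pvBLoop, hB0, h0]
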